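-- pv_equiv track=rewrite | github.com/YunJ1e/LearnPython | DataStructure/QueueAndStack.py | check_valid_queue_sequence
-- ===== SOURCE A (Python) =====
-- from collections import deque
--
-- def check_valid_queue_sequence(pushed_queue, popped_queue):
-- 	new_popped_queue = deque()
-- 	j = 0
-- 	for i in pushed_queue:
-- 		new_popped_queue.append(i)
--
-- 		while len(new_popped_queue) > 0 and j < len(popped_queue) and new_popped_queue[0] == popped_queue[j]:
-- 			new_popped_queue.popleft()
-- 			j += 1
-- 	return j == len(popped_queue)
-- ===== SOURCE B (Python) =====
-- def check_valid_queue_sequence(pushed_queue, popped_queue):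
--     popped_list = list(popped_queue)
--     return list(pushed_queue)[:len(popped_list)] == popped_list
-- ===== Notes on version B (the rewrite author's own statement) =====
-- stated objective: simpler
-- what changed: Replaced the deque push/pop simulation (FIFO pops only ever match in order) with a direct prefix comparison: popped_queue must equal the length-matched slice of pushed_queue; one slice + list equality instead of a per-element Python loop.
import Mathlib
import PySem

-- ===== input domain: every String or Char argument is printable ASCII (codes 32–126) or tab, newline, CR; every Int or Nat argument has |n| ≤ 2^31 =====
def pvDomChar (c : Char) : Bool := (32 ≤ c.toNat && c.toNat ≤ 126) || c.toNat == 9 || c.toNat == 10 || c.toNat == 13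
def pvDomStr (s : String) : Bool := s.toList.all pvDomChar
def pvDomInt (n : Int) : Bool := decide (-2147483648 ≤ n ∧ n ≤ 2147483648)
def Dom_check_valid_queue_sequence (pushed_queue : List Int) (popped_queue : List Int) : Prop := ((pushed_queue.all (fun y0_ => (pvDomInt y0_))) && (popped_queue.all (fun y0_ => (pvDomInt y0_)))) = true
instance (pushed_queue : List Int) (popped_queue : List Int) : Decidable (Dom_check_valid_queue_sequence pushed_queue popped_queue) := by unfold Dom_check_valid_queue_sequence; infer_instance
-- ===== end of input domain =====

-- B replaces A's deque push/pop simulation with a direct prefix comparison (objective: simpler).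

-- ===== PORT A =====
-- inner `while` loop of A: pop from the queue front while it matches popped_queue[j]
def pvWhileA (queue : List Int) (popped : List Int) (j : Nat) : List Int × Nat :=
  match queue with
  | [] => ([], j)
  | x :: rest =>
    if h : j < popped.length then
      if x = popped[j] then pvWhileA rest popped (j + 1) else (x :: rest, j)
    else (x :: rest, j)

-- the `for i in pushed_queue` loop, carrying (new_popped_queue, j)
def pvForA (xs : List Int) (popped : List Int) (queue : List Int) (j : Nat) : Nat :=
  match xs with
  | [] => j
  | x :: rest =>
    let s := pvWhileA (queue ++ [x]) popped j
    pvForA rest popped s.1 s.2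

def check_valid_queue_sequence (pushed_queue : List Int) (popped_queue : List Int) : Bool :=
  decide (pvForA pushed_queue popped_queue [] 0 = popped_queue.length)

-- ===== PORT B =====
-- list(pushed)[:n] with n = len(popped) ≥ 0 is exactly List.take n; `==` on lists is list equality
def check_valid_queue_sequence_alt (pushed_queue : List Int) (popped_queue : List Int) : Bool :=
  decide (pushed_queue.take popped_queue.length = popped_queue)

-- ===== PRECONDITION & SPEC =====
def Spec_check_valid_queue_sequence (pushed_queue : List Int) (popped_queue : List Int) (out : Bool) : Prop := out = check_valid_queue_sequence_alt pushed_queue popped_queue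
instance (pushed_queue : List Int) (popped_queue : List Int) (out : Bool) : Decidable (Spec_check_valid_queue_sequence pushed_queue popped_queue out) := by unfold Spec_check_valid_queue_sequence; infer_instance

-- ===== CLAIM (what is proved, stated in full; the proofs are below) =====
def Claim_equal_check_valid_queue_sequence : Prop := ∀ (pushed_queue : List Int) (popped_queue : List Int), Dom_check_valid_queue_sequence pushed_queue popped_queue → Spec_check_valid_queue_sequence pushed_queue popped_queue (check_valid_queue_sequence pushed_queue popped_queue)

-- ===== LEMMAS AND PROOFS =====
-- length of the longest common prefix (stops at the first mismatch)
def pvLcp : List Int → List Int → Nat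
  | a :: as_, b :: bs => if a = b then pvLcp as_ bs + 1 else 0
  | _, _ => 0

theorem pvLcp_nil_right (u : List Int) : pvLcp u [] = 0 := by
  cases u <;> simp [pvLcp]

theorem pvWhileA_char (q popped : List Int) (j : Nat) :
    pvWhileA q popped j =
      (q.drop (pvLcp q (popped.drop j)), j + pvLcp q (popped.drop j)) := by
  induction q generalizing j with
  | nil => simp [pvWhileA, pvLcp]
  | cons x rest ih =>
    unfold pvWhileA
    by_cases h : j < popped.length
    · have hd : popped.drop j = popped[j] :: popped.drop (j + 1) :=
        List.drop_eq_getElem_cons h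
      rw [hd]
      by_cases hx : x = popped[j]
      · simp only [hx, dif_pos h, ih (j + 1), pvLcp]
        
        refine Prod.ext ?_ ?_
        · simp [List.drop_succ_cons]
        · simp; omega
      · simp [h, hx, pvLcp]
    · have hd : popped.drop j = [] := List.drop_eq_nil_of_le (by omega)
      simp [h, hd, pvLcp_nil_right]

theorem pvLcp_drop_self (u : List Int) : ∀ v : List Int,
    pvLcp (u.drop (pvLcp u v)) (v.drop (pvLcp u v)) = 0 := by
  induction u with
  | nil => intro v; simp [pvLcp]
  | cons a as_ ih =>
    intro v
    cases v with
    | nil => simp [pvLcp_nil_right]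
    | cons b bs =>
      by_cases hab : a = b
      · simpa [pvLcp, hab] using ih bs
      · simp [pvLcp, hab]

theorem pvLcp_append (u : List Int) : ∀ (v xs : List Int),
    pvLcp (u ++ xs) v =
      pvLcp u v + pvLcp (u.drop (pvLcp u v) ++ xs) (v.drop (pvLcp u v)) := by
  induction u with
  | nil => intro v xs; simp [pvLcp]
  | cons a as_ ih =>
    intro v xs
    cases v with
    | nil => simp [pvLcp_nil_right, pvLcp]
    | cons b bs =>
      by_cases hab : a = b
      · simp only [List.cons_append, pvLcp, if_pos hab]
        rw [ih bs xs]
        simp [List.drop_succ_cons]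
        omega
      · simp [pvLcp, hab]

theorem pvForA_inv (popped : List Int) (xs : List Int) : ∀ (q : List Int) (j : Nat),
    pvLcp q (popped.drop j) = 0 →
    pvForA xs popped q j = j + pvLcp (q ++ xs) (popped.drop j) := by
  induction xs with
  | nil =>
    intro q j h
    simp [pvForA, h]
  | cons x rest ih =>
    intro q j h
    have hw := pvWhileA_char (q ++ [x]) popped j
    have hdrop : popped.drop (j + pvLcp (q ++ [x]) (popped.drop j)) =
        (popped.drop j).drop (pvLcp (q ++ [x]) (popped.drop j)) := by
      rw [List.drop_drop]
    have hstable : pvLcp ((q ++ [x]).drop (pvLcp (q ++ [x]) (popped.drop j)))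
        (popped.drop (j + pvLcp (q ++ [x]) (popped.drop j))) = 0 := by
      rw [hdrop]; exact pvLcp_drop_self (q ++ [x]) (popped.drop j)
    have hrec := ih _ _ hstable
    simp only [pvForA, hw]
    have ha := pvLcp_append (q ++ [x]) (popped.drop j) rest
    rw [hrec, hdrop, show q ++ x :: rest = (q ++ [x]) ++ rest by simp]
    omega

theorem pvLcp_eq_length_iff (v : List Int) : ∀ u : List Int,
    pvLcp u v = v.length ↔ u.take v.length = v := by
  induction v with
  | nil => intro u; simp [pvLcp_nil_right]
  | cons b bs ih =>
    intro u
    cases u with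
    | nil => simp [pvLcp]
    | cons a as_ =>
      by_cases hab : a = b
      · simpa [pvLcp, hab] using ih as_
      · simp [pvLcp, hab]

-- ===== VERDICT (by name: the statement is the Claim_ definition above) =====
theorem check_valid_queue_sequence_spec : Claim_equal_check_valid_queue_sequence := by
  intro pushed popped _
  unfold Spec_check_valid_queue_sequence check_valid_queue_sequence check_valid_queue_sequence_alt
  have h := pvForA_inv popped pushed [] 0 (by simp [pvLcp])
  simp only [List.drop_zero, List.nil_append, Nat.zero_add] at h
  rw [h]
  simp [pvLcp_eq_length_iff]
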